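-- pv_equiv track=rewrite | github.com/shahhassansh/LeetcodeProblems | python3/rotateTheBox.py | shiftArray
-- ===== SOURCE A (Python) =====
-- def shiftArray(arr):
--     wall = len(arr) -1
--     for i in range(len(arr)-1,-1,-1):
--         if arr[i] == '*':
--             wall=i-1
--         elif arr[i] == '#':
--             if wall != i:
--                 arr[i] = '.'
--                 arr[wall] = '#'
--             wall -=1
--     return arr
-- ===== SOURCE B (Python) =====
-- def shiftArray(arr):
--     # One forward pass splitting the row into '*'-bounded segments; each segment is
--     # rewritten as "left part with stones blanked" + "all its stones packed at the right".
--     # Mutates arr in place (like the original) and returns it.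
--     out, seg = [], []
--     for x in arr:
--         if x == '*':
--             s = seg.count('#')
--             out += ['.' if y == '#' else y for y in seg[:len(seg) - s]] + ['#'] * s + ['*']
--             seg = []
--         else:
--             seg.append(x)
--     s = seg.count('#')
--     out += ['.' if y == '#' else y for y in seg[:len(seg) - s]] + ['#'] * s
--     arr[:] = out
--     return arr
-- ===== Notes on version B (the rewrite author's own statement) =====
-- stated objective: alternative
-- what changed: A simulates gravity right-to-left with a moving wall pointer and in-place element swaps; B makes one forward pass that splits the row into '*'-bounded segments and rewrites each segment as its non-stone left part (stones blanked to '.') followed by all its stones packed at the right.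
import Mathlib
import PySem

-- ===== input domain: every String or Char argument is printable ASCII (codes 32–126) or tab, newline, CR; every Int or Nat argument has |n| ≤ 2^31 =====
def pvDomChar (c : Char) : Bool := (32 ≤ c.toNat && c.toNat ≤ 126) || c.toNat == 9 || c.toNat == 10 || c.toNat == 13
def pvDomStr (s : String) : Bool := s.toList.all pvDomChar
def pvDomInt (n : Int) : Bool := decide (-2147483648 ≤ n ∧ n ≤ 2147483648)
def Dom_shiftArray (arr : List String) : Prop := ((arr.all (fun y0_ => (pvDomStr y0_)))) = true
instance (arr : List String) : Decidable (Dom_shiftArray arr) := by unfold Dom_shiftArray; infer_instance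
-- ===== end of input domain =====

-- B replaces A's right-to-left wall-pointer sweep by one forward pass over '*'-bounded
-- segments (objective: alternative decomposition, same O(n) cost). Both Pythons mutate
-- arr in place and return the same object; the theorems are about the returned value.

-- ===== PORT A =====
-- one iteration of A's "for i in range(len(arr)-1,-1,-1)" body; state = (arr, wall)
def stepA (st : List String × Int) (i : Int) : List String × Int :=
  if PySem.List.pyGetD st.1 i "" = "*" then (st.1, i - 1)
  else if PySem.List.pyGetD st.1 i "" = "#" then
    if st.2 ≠ i then
      (PySem.List.pySetD (PySem.List.pySetD st.1 i ".") st.2 "#", st.2 - 1)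
    else (st.1, st.2 - 1)
  else st

def shiftArray (arr : List String) : List String :=
  ((PySem.List.pyRange ((arr.length : Int) - 1) (-1) (-1)).foldl stepA
    (arr, (arr.length : Int) - 1)).1

-- ===== PORT B =====
-- ['.' if y == '#' else y for y in l]
def segmap (l : List String) : List String := l.map (fun y => if y = "#" then "." else y)

-- rewrite of one '*'-free segment: left part with stones blanked, stones packed at the right
def segFlush (seg : List String) : List String :=
  segmap (seg.take (seg.length - seg.count "#")) ++ List.replicate (seg.count "#") "#"

-- loop body of B's single forward pass; state = (out, seg)
def stepB (st : List String × List String) (x : String) : List String × List String :=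
  if x = "*" then (st.1 ++ segFlush st.2 ++ ["*"], []) else (st.1, st.2 ++ [x])

def shiftArray_alt (arr : List String) : List String :=
  ((arr.foldl stepB ([], [])).1) ++ segFlush ((arr.foldl stepB ([], [])).2)

-- ===== PRECONDITION & SPEC =====
def Spec_shiftArray (arr : List String) (out : List String) : Prop := out = shiftArray_alt arr
instance (arr : List String) (out : List String) : Decidable (Spec_shiftArray arr out) := by unfold Spec_shiftArray; infer_instance

-- ===== CLAIM (what is proved, stated in full; the proofs are below) =====
def Claim_equal_shiftArray : Prop := ∀ (arr : List String), Dom_shiftArray arr → Spec_shiftArray arr (shiftArray arr)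

-- ===== LEMMAS AND PROOFS =====

-- A's sweep over a '*'-free region at the top: after processing indices ≥ |u|+j, the
-- stones seen so far are packed at the top and the cells they left are blanked
lemma runA (q : List String) (hq : "*" ∉ q) :
    ∀ (j : Nat), j ≤ q.length → ∀ (u : List String),
    (PySem.List.pyRange ((u.length : Int) + (q.length : Int) - 1) ((u.length : Int) + (j : Int) - 1) (-1)).foldl stepA
      (u ++ q, (u.length : Int) + (q.length : Int) - 1)
    = (u ++ q.take j ++ segmap ((q.drop j).take (q.length - j - (q.drop j).count "#"))
         ++ List.replicate ((q.drop j).count "#") "#",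
       (u.length : Int) + (q.length : Int) - 1 - ((q.drop j).count "#")) := by
  suffices H : ∀ (d j : Nat), j + d = q.length → ∀ (u : List String),
      (PySem.List.pyRange ((u.length : Int) + (q.length : Int) - 1) ((u.length : Int) + (j : Int) - 1) (-1)).foldl stepA
        (u ++ q, (u.length : Int) + (q.length : Int) - 1)
      = (u ++ q.take j ++ segmap ((q.drop j).take (q.length - j - (q.drop j).count "#"))
           ++ List.replicate ((q.drop j).count "#") "#",
         (u.length : Int) + (q.length : Int) - 1 - ((q.drop j).count "#")) by
    intro j hj u; exact H (q.length - j) j (by omega) u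
  intro d
  induction d with
  | zero =>
    intro j hj u
    have hj' : j = q.length := by omega
    subst hj'
    rw [PySem.List.pyRange_neg_one_eq_nil (by omega)]
    simp [segmap]
  | succ d ih =>
    intro j hj u
    have hjlt : j < q.length := by omega
    have hx : q[j]? = some (q[j]'hjlt) := List.getElem?_eq_getElem hjlt
    set x := q[j]'hjlt with hxdef
    have hxmem : x ∈ q := List.getElem_mem hjlt
    have htake : q.take (j+1) = q.take j ++ [x] := by
      rw [List.take_add_one, hx]; rfl
    have hdrop : q.drop j = x :: q.drop (j+1) := List.drop_eq_getElem_cons hjlt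
    have hlentakej : (q.take j).length = j := by simp; omega
    set c' := (q.drop (j+1)).count "#" with hc'def
    have hcle : c' ≤ q.length - (j+1) := by
      have h := List.count_le_length (a := "#") (l := q.drop (j+1))
      simpa using h
    have hcount : (q.drop j).count "#" = c' + (if x = "#" then 1 else 0) := by
      rw [hdrop, List.count_cons]
      simp [beq_iff_eq]
      rfl
    set T := (q.drop (j+1)).take (q.length - (j+1) - c') with hTdef
    have hTlen : T.length = q.length - j - 1 - c' := by
      rw [hTdef]; simp; omega
    have hsplit : PySem.List.pyRange ((u.length : Int) + (q.length : Int) - 1) ((u.length : Int) + (j : Int) - 1) (-1)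
        = PySem.List.pyRange ((u.length : Int) + (q.length : Int) - 1) ((u.length : Int) + (j : Int)) (-1) ++ [(u.length : Int) + (j : Int)] := by
      rw [PySem.List.pyRange_neg_one_eq_reverse, PySem.List.pyRange_neg_one_eq_reverse]
      rw [show ((u.length : Int) + (j : Int) - 1 + 1) = (u.length : Int) + (j : Int) from by ring]
      rw [PySem.List.pyRange_one_cons (by omega)]
      rw [List.reverse_cons]
    rw [hsplit, List.foldl_append]
    have hstep1 := ih (j+1) (by omega) u
    rw [show ((u.length : Int) + ((j+1 : Nat) : Int) - 1) = (u.length : Int) + (j : Int) from by push_cast; ring] at hstep1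
    rw [hstep1]
    simp only [List.foldl_cons, List.foldl_nil]
    have hS : u ++ q.take (j+1) ++ segmap T ++ List.replicate c' "#"
        = (u ++ q.take j) ++ x :: (segmap T ++ List.replicate c' "#") := by
      rw [htake]; simp
    have hulen : (u ++ q.take j).length = u.length + j := by simp [hlentakej]
    have hgetS : PySem.List.pyGetD ((u ++ q.take j) ++ x :: (segmap T ++ List.replicate c' "#")) ((u.length : Int) + (j : Int)) "" = x := by
      rw [show ((u.length : Int) + (j : Int)) = ((u.length + j : Nat) : Int) from by push_cast; ring,
        PySem.List.pyGetD_natCast]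
      rw [List.getD_eq_getElem?_getD, List.getElem?_append_right (by omega), hulen, Nat.sub_self]
      rfl
    rw [hS]
    by_cases hxstar : x = "*"
    · exact absurd (hxstar ▸ hxmem) hq
    by_cases hxh : x = "#"
    · -- a stone at position j
      by_cases hcw : c' = q.length - j - 1
      · -- wall == i : everything above j is already a stone; no write, wall moves down
        have hT0 : T = [] := by
          rw [hTdef, show q.length - (j+1) - c' = 0 from by omega, List.take_zero]
        have hstep : stepA ((u ++ q.take j) ++ x :: (segmap T ++ List.replicate c' "#"), (u.length : Int) + (q.length : Int) - 1 - (c' : Int)) ((u.length : Int) + (j : Int))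
            = ((u ++ q.take j) ++ x :: (segmap T ++ List.replicate c' "#"), (u.length : Int) + (j : Int) - 1) := by
          simp only [stepA]
          rw [hgetS, if_neg hxstar, if_pos hxh,
            if_neg (show ¬(((u.length : Int) + (q.length : Int) - 1 - (c' : Int)) ≠ ((u.length : Int) + (j : Int))) from by omega)]
          simp only [Prod.mk.injEq, true_and]
          omega
        rw [hstep]
        have hcnt2 : List.count "#" (List.drop j q) = c' + 1 := by rw [hcount, hxh]; simp
        simp only [Prod.mk.injEq]
        constructor
        · rw [hcnt2, hT0, hxh, show q.length - j - (c' + 1) = 0 from by omega]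
          simp [segmap, List.replicate_succ]
        · rw [hcnt2]
          omega
      · -- wall > i : the stone is written at the wall slot and its cell blanked
        have hclt : c' < q.length - j - 1 := by omega
        have hset1 : PySem.List.pySetD ((u ++ q.take j) ++ x :: (segmap T ++ List.replicate c' "#")) ((u.length : Int) + (j : Int)) "."
            = (u ++ q.take j) ++ "." :: (segmap T ++ List.replicate c' "#") := by
          rw [show ((u.length : Int) + (j : Int)) = ((u.length + j : Nat) : Int) from by push_cast; ring,
            PySem.List.pySetD_natCast, List.set_append, if_neg (by omega)]
          rw [hulen, Nat.sub_self, List.set_cons_zero]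
        have hset2 : PySem.List.pySetD ((u ++ q.take j) ++ "." :: (segmap T ++ List.replicate c' "#")) ((u.length : Int) + (q.length : Int) - 1 - (c' : Int)) "#"
            = (u ++ q.take j) ++ "." :: (segmap (T.take (T.length - 1)) ++ "#" :: List.replicate c' "#") := by
          rw [show ((u.length : Int) + (q.length : Int) - 1 - (c' : Int)) = ((u.length + q.length - 1 - c' : Nat) : Int) from by omega,
            PySem.List.pySetD_natCast, List.set_append, if_neg (by rw [hulen]; omega)]
          rw [hulen, show u.length + q.length - 1 - c' - (u.length + j) = (q.length - j - 2 - c') + 1 from by omega,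
            List.set_cons_succ]
          rw [List.set_append, if_pos (by simp [segmap, hTlen]; omega)]
          rw [List.set_eq_take_append_cons_drop, if_pos (by simp [segmap, hTlen]; omega)]
          have hdnil : (segmap T).drop ((q.length - j - 2 - c') + 1) = [] := by
            apply List.drop_eq_nil_of_le
            simp [segmap, hTlen]
            omega
          rw [hdnil]
          have htk : (segmap T).take (q.length - j - 2 - c') = segmap (T.take (T.length - 1)) := by
            rw [show T.length - 1 = q.length - j - 2 - c' from by omega]
            simp [segmap, List.map_take]
          rw [htk]
          simp
        have hstep : stepA ((u ++ q.take j) ++ x :: (segmap T ++ List.replicate c' "#"), (u.length : Int) + (q.length : Int) - 1 - (c' : Int)) ((u.length : Int) + (j : Int))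
            = ((u ++ q.take j) ++ "." :: (segmap (T.take (T.length - 1)) ++ "#" :: List.replicate c' "#"), (u.length : Int) + (q.length : Int) - 1 - (c' : Int) - 1) := by
          simp only [stepA]
          rw [hgetS, if_neg hxstar, if_pos hxh,
            if_pos (show (((u.length : Int) + (q.length : Int) - 1 - (c' : Int)) ≠ ((u.length : Int) + (j : Int))) from by omega)]
          rw [hset1, hset2]
        rw [hstep]
        have hcnt2 : List.count "#" (List.drop j q) = c' + 1 := by rw [hcount, hxh]; simp
        simp only [Prod.mk.injEq]
        constructor
        · rw [hcnt2, show q.length - j - (c' + 1) = (q.length - j - 2 - c') + 1 from by omega,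
            hdrop, List.take_succ_cons]
          have htk2 : (q.drop (j+1)).take (q.length - j - 2 - c') = T.take (T.length - 1) := by
            rw [hTdef, List.take_take, show T.length - 1 = q.length - j - 2 - c' from by omega]
            congr 1
            omega
          rw [htk2, hxh]
          simp [segmap, List.replicate_succ]
        · rw [hcnt2]
          omega
    · -- neither a wall nor a stone: nothing happens
      have hstep : stepA ((u ++ q.take j) ++ x :: (segmap T ++ List.replicate c' "#"), (u.length : Int) + (q.length : Int) - 1 - (c' : Int)) ((u.length : Int) + (j : Int))
          = ((u ++ q.take j) ++ x :: (segmap T ++ List.replicate c' "#"), (u.length : Int) + (q.length : Int) - 1 - (c' : Int)) := by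
        simp only [stepA]
        rw [hgetS, if_neg hxstar, if_neg hxh]
      rw [hstep]
      have hcnt0 : List.count "#" (List.drop j q) = c' := by rw [hcount, if_neg hxh]; rfl
      simp only [Prod.mk.injEq]
      constructor
      · rw [hcnt0, show q.length - j - c' = (q.length - (j+1) - c') + 1 from by omega,
          hdrop, List.take_succ_cons]
        simp [segmap, hxh, hTdef]
      · rw [hcnt0]

-- A's sweep over indices j-1..0 only touches the first j cells when wall starts below |a|
lemma locA : ∀ (j : Nat) (a r : List String) (w : Int), (j : Int) - 1 ≤ w → w < (a.length : Int) →
    (PySem.List.pyRange ((j : Int) - 1) (-1) (-1)).foldl stepA (a ++ r, w)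
    = (((PySem.List.pyRange ((j : Int) - 1) (-1) (-1)).foldl stepA (a, w)).1 ++ r,
       ((PySem.List.pyRange ((j : Int) - 1) (-1) (-1)).foldl stepA (a, w)).2) := by
  intro j
  induction j with
  | zero =>
    intro a r w h1 h2
    rw [PySem.List.pyRange_neg_one_eq_nil (by norm_num)]
    simp
  | succ j ih =>
    intro a r w h1 h2
    have hja : j < a.length := by omega
    have hjw : (j : Int) ≤ w := by push_cast at h1; omega
    have hb : ((j + 1 : Nat) : Int) - 1 = (j : Int) := by push_cast; ring
    rw [hb, PySem.List.pyRange_neg_one_cons (by omega), List.foldl_cons, List.foldl_cons]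
    have hget : (a ++ r)[j]?.getD "" = a[j]?.getD "" := by
      rw [List.getElem?_append_left hja]
    by_cases hstar : a[j]?.getD "" = "*"
    · rw [show stepA (a ++ r, w) (j : Int) = (a ++ r, (j : Int) - 1) from by
          simp [stepA, hget, hstar],
        show stepA (a, w) (j : Int) = (a, (j : Int) - 1) from by simp [stepA, hstar]]
      exact ih a r _ (by omega) (by omega)
    · by_cases hhash : a[j]?.getD "" = "#"
      · by_cases hw : w = (j : Int)
        · subst hw
          rw [show stepA (a ++ r, (j : Int)) (j : Int) = (a ++ r, (j : Int) - 1) from by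
              simp [stepA, hget, hhash],
            show stepA (a, (j : Int)) (j : Int) = (a, (j : Int) - 1) from by
              simp [stepA, hhash]]
          exact ih a r _ (by omega) (by omega)
        · have hwpos : (0 : Int) ≤ w := le_trans (by positivity) hjw
          have hwlen : w.toNat < a.length := by omega
          have hset : PySem.List.pySetD ((a ++ r).set j ".") w "#"
              = (a.set j ".").set w.toNat "#" ++ r := by
            rw [List.set_append, if_pos hja, PySem.List.pySetD_of_nonneg _ _ hwpos, List.set_append,
              if_pos (show w.toNat < (a.set j ".").length by simpa using hwlen)]
          have hset' : PySem.List.pySetD (a.set j ".") w "#" = (a.set j ".").set w.toNat "#" :=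
            PySem.List.pySetD_of_nonneg _ _ hwpos
          rw [show stepA (a ++ r, w) (j : Int) = ((a.set j ".").set w.toNat "#" ++ r, w - 1) from by
              simp [stepA, hget, hhash, hw, hset],
            show stepA (a, w) (j : Int) = ((a.set j ".").set w.toNat "#", w - 1) from by
              simp [stepA, hhash, hw, hset']]
          exact ih _ r _ (by omega) (by simp; omega)
      · rw [show stepA (a ++ r, w) (j : Int) = (a ++ r, w) from by
            simp [stepA, hget, hstar, hhash],
          show stepA (a, w) (j : Int) = (a, w) from by simp [stepA, hstar, hhash]]
        exact ih a r _ (by omega) h2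

lemma A_nostar (arr : List String) (h : "*" ∉ arr) : shiftArray arr = segFlush arr := by
  unfold shiftArray
  have h0 := runA arr h 0 (Nat.zero_le _) []
  simp only [List.length_nil, Nat.cast_zero, List.nil_append, List.take_zero, List.drop_zero,
    Nat.sub_zero] at h0
  rw [show ((0 : Int) + (arr.length : Int) - 1) = (arr.length : Int) - 1 from by ring,
    show ((0 : Int) + (0 : Int) - 1) = (-1 : Int) from by ring] at h0
  rw [h0]
  simp [segFlush]

lemma A_split (p q : List String) (hq : "*" ∉ q) :
    shiftArray (p ++ "*" :: q) = shiftArray p ++ "*" :: segFlush q := by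
  unfold shiftArray
  have hlen : (((p ++ "*" :: q).length : Nat) : Int) = (p.length : Int) + (q.length : Int) + 1 := by
    simp; push_cast; ring
  rw [hlen]
  have hsplitR : PySem.List.pyRange ((p.length : Int) + (q.length : Int) + 1 - 1) (-1) (-1)
      = PySem.List.pyRange ((p.length : Int) + (q.length : Int) + 1 - 1) ((p.length : Int)) (-1)
        ++ [(p.length : Int)] ++ PySem.List.pyRange ((p.length : Int) - 1) (-1) (-1) := by
    rw [PySem.List.pyRange_neg_one_eq_reverse ((p.length : Int) + (q.length : Int) + 1 - 1) (-1),
      PySem.List.pyRange_neg_one_eq_reverse ((p.length : Int) + (q.length : Int) + 1 - 1) ((p.length : Int)),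
      PySem.List.pyRange_neg_one_eq_reverse ((p.length : Int) - 1) (-1)]
    rw [show ((-1 : Int) + 1) = 0 from by ring,
      show ((p.length : Int) - 1 + 1) = (p.length : Int) from by ring]
    rw [PySem.List.pyRange_one_append 0 ((p.length : Int)) ((p.length : Int) + (q.length : Int) + 1 - 1 + 1) (by omega) (by omega),
      PySem.List.pyRange_one_append ((p.length : Int)) ((p.length : Int) + 1) ((p.length : Int) + (q.length : Int) + 1 - 1 + 1) (by omega) (by omega)]
    rw [List.reverse_append, List.reverse_append]
    rw [show PySem.List.pyRange ((p.length : Int)) ((p.length : Int) + 1) = [(p.length : Int)] from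
      PySem.List.pyRange_one_singleton _]
    simp [List.append_assoc]
  rw [hsplitR, List.foldl_append, List.foldl_append]
  -- chunk 1: the '*'-free suffix q, via runA with u = p ++ ["*"]
  have h1 := runA q hq 0 (Nat.zero_le _) (p ++ ["*"])
  have hu1 : (((p ++ ["*"]).length : Nat) : Int) = (p.length : Int) + 1 := by simp
  rw [hu1] at h1
  rw [show ((p.length : Int) + 1 + (q.length : Int) - 1) = (p.length : Int) + (q.length : Int) + 1 - 1 from by ring,
    show ((p.length : Int) + 1 + ((0 : Nat) : Int) - 1) = (p.length : Int) from by ring] at h1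
  rw [show p ++ "*" :: q = (p ++ ["*"]) ++ q from by simp]
  rw [h1]
  simp only [List.take_zero, List.drop_zero, Nat.sub_zero]
  rw [show (p ++ ["*"] ++ [] ++ segmap (List.take (q.length - List.count "#" q) q) ++ List.replicate (List.count "#" q) "#") = p ++ "*" :: segFlush q from by simp [segFlush]]
  rw [List.foldl_cons, List.foldl_nil]
  have hgetstar : PySem.List.pyGetD (p ++ "*" :: segFlush q) ((p.length : Nat) : Int) "" = "*" := by
    rw [PySem.List.pyGetD_natCast, List.getD_eq_getElem?_getD,
      List.getElem?_append_right (le_refl p.length), Nat.sub_self]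
    rfl
  have hstep2 : stepA (p ++ "*" :: segFlush q, (p.length : Int) + (q.length : Int) + 1 - 1 - (List.count "#" q : Int)) ((p.length : Int))
      = (p ++ "*" :: segFlush q, (p.length : Int) - 1) := by
    simp only [stepA]
    rw [if_pos hgetstar]
  rw [hstep2]
  rw [locA p.length p ("*" :: segFlush q) ((p.length : Int) - 1) (by omega) (by omega)]

lemma B_nostar_fold (q : List String) (h : "*" ∉ q) :
    ∀ st : List String × List String, q.foldl stepB st = (st.1, st.2 ++ q) := by
  induction q with
  | nil => intro st; simp
  | cons x xs ih =>
    intro st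
    have hx : x ≠ "*" := fun e => h (e ▸ List.mem_cons_self)
    have hxs : "*" ∉ xs := fun m => h (List.mem_cons_of_mem _ m)
    simp [List.foldl_cons, stepB, hx, ih hxs]

lemma B_nostar (arr : List String) (h : "*" ∉ arr) : shiftArray_alt arr = segFlush arr := by
  unfold shiftArray_alt
  rw [B_nostar_fold arr h ([], [])]
  simp

lemma B_split (p q : List String) (hq : "*" ∉ q) :
    shiftArray_alt (p ++ "*" :: q) = shiftArray_alt p ++ "*" :: segFlush q := by
  unfold shiftArray_alt
  have h : (p ++ "*" :: q).foldl stepB ([], [])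
      = ((p.foldl stepB ([], [])).1 ++ segFlush ((p.foldl stepB ([], [])).2) ++ ["*"], ([] : List String) ++ q) := by
    rw [show p ++ "*" :: q = (p ++ ["*"]) ++ q by simp, List.foldl_append, List.foldl_append]
    rw [B_nostar_fold q hq]
    simp [stepB]
  rw [h]
  simp

lemma main_equiv : ∀ (arr : List String), shiftArray arr = shiftArray_alt arr := by
  have key : ∀ (n : Nat) (arr : List String), arr.length ≤ n → shiftArray arr = shiftArray_alt arr := by
    intro n
    induction n with
    | zero =>
      intro arr h
      have : arr = [] := List.eq_nil_of_length_eq_zero (Nat.le_zero.mp h)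
      subst this; decide
    | succ n ih =>
      intro arr h
      by_cases hs : "*" ∈ arr
      · have hrev : "*" ∈ arr.reverse := by simpa using hs
        obtain ⟨as, bs, heq, hna⟩ := List.eq_append_cons_of_mem hrev
        have harr : arr = bs.reverse ++ "*" :: as.reverse := by
          have := congrArg List.reverse heq
          simpa using this
        have hq : "*" ∉ as.reverse := by simpa using hna
        have hlen : bs.reverse.length ≤ n := by
          have := congrArg List.length harr
          simp at this ⊢
          omega
        rw [harr, A_split _ _ hq, B_split _ _ hq, ih _ hlen]
      · rw [A_nostar arr hs, B_nostar arr hs]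
  intro arr; exact key arr.length arr le_rfl

-- ===== VERDICT (by name: the statement is the Claim_ definition above) =====
theorem shiftArray_spec : Claim_equal_shiftArray := by
  intro arr _
  unfold Spec_shiftArray
  exact main_equiv arr
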